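-- pv_equiv track=rewrite | github.com/mironenkoasja/bibliorecordsminer | bibliorecordminer/bibliorecordsminer.py | median_lenght
-- ===== SOURCE A (Python) =====
-- def median_lenght(paragraphs):
--     l = 0
--     for par in paragraphs:
--         if len(par.split('\n')) > 20:
--             l+=3
--         elif len(par.split('\n')) > 15:
--             l+=2
--         elif len(par.split('\n')) > 6:
--             l+=1
--
--
--     return l
-- ===== SOURCE B (Python) =====
-- def median_lenght(paragraphs):
--     counts = [len(p.split('\n')) for p in paragraphs]
--     total = 0
--     for t in (6, 15, 20):
--         total += sum(1 for n in counts if n > t)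
--     return total
-- ===== Notes on version B (the rewrite author's own statement) =====
-- stated objective: alternative
-- what changed: Inverts the loop structure: instead of one pass assigning each paragraph a weight via an if/elif ladder, B precomputes the line counts and then, threshold-major, counts for each of 6/15/20 how many paragraphs exceed it and sums the three exceedance counts (valid by swapping the order of summation).
import Mathlib
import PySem

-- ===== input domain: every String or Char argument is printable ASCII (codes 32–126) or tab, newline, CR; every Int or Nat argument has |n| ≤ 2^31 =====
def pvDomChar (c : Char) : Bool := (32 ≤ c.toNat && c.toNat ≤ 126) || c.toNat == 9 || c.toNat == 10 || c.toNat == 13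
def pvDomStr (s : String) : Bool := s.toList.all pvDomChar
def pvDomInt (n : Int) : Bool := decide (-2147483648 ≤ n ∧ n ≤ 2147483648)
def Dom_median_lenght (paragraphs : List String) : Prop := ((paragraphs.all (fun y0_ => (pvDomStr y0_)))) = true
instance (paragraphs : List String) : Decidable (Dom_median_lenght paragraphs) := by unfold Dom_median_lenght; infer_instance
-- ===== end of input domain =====

-- B inverts the loop structure: it precomputes line counts once, then for each threshold 6/15/20 counts the paragraphs exceeding it and sums the three counts (alternative decomposition, same cost).


-- ===== PORT A =====
def median_lenght (paragraphs : List String) : Int :=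
  paragraphs.foldl (fun l par =>
    if (PySem.Chars.splitOn par.toList ['\n']).length > 20 then l + 3
    else if (PySem.Chars.splitOn par.toList ['\n']).length > 15 then l + 2
    else if (PySem.Chars.splitOn par.toList ['\n']).length > 6 then l + 1
    else l) 0

-- ===== PORT B =====
-- counts = [len(p.split('\n')) for p in paragraphs]
def pvCounts (paragraphs : List String) : List Int :=
  paragraphs.map (fun p => ((PySem.Chars.splitOn p.toList ['\n']).length : Int))

-- for t in (6,15,20): total += sum(1 for n in counts if n > t)
def median_lenght_alt (paragraphs : List String) : Int :=
  let counts := pvCounts paragraphs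
  ([6, 15, 20] : List Int).foldl (fun total t =>
    total + (counts.foldl (fun s n => if n > t then s + 1 else s) 0)) 0

-- ===== PRECONDITION & SPEC =====
def Spec_median_lenght (paragraphs : List String) (out : Int) : Prop := out = median_lenght_alt paragraphs
instance (paragraphs : List String) (out : Int) : Decidable (Spec_median_lenght paragraphs out) := by unfold Spec_median_lenght; infer_instance

-- ===== CLAIM (what is proved, stated in full; the proofs are below) =====
def Claim_equal_median_lenght : Prop := ∀ (paragraphs : List String), Dom_median_lenght paragraphs → Spec_median_lenght paragraphs (median_lenght paragraphs)

-- ===== LEMMAS AND PROOFS =====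

-- inner counting loop of B, shifted by its accumulator
theorem pvCountLoop (ns : List Int) (t s : Int) :
    ns.foldl (fun s n => if n > t then s + 1 else s) s
      = s + ns.foldl (fun s n => if n > t then s + 1 else s) 0 := by
  induction ns generalizing s with
  | nil => simp
  | cons n ns ih =>
    simp only [List.foldl_cons]
    have h1 := ih (s + 1)
    have h2 := ih s
    have h3 := ih (0 + 1)
    have h4 := ih 0
    split_ifs <;> omega

-- A's fold, shifted by its accumulator
theorem pvLadderLoop (paragraphs : List String) (l : Int) :
    paragraphs.foldl (fun l par =>
      if (PySem.Chars.splitOn par.toList ['\n']).length > 20 then l + 3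
      else if (PySem.Chars.splitOn par.toList ['\n']).length > 15 then l + 2
      else if (PySem.Chars.splitOn par.toList ['\n']).length > 6 then l + 1
      else l) l
    = l + paragraphs.foldl (fun l par =>
      if (PySem.Chars.splitOn par.toList ['\n']).length > 20 then l + 3
      else if (PySem.Chars.splitOn par.toList ['\n']).length > 15 then l + 2
      else if (PySem.Chars.splitOn par.toList ['\n']).length > 6 then l + 1
      else l) 0 := by
  induction paragraphs generalizing l with
  | nil => simp
  | cons p ps ih =>
    simp only [List.foldl_cons]
    have h1 := ih (l + 3)
    have h2 := ih (l + 2)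
    have h3 := ih (l + 1)
    have h4 := ih l
    have h5 := ih (0 + 3)
    have h6 := ih (0 + 2)
    have h7 := ih (0 + 1)
    have h8 := ih 0
    split_ifs <;> omega

-- the order-of-summation swap: A's per-paragraph ladder total equals B's three threshold counts
theorem pvSwap (paragraphs : List String) :
    median_lenght paragraphs = median_lenght_alt paragraphs := by
  unfold median_lenght median_lenght_alt pvCounts
  induction paragraphs with
  | nil => simp
  | cons p ps ih =>
    simp only [List.foldl_cons, List.map_cons]
    rw [pvLadderLoop, ih]
    simp only [List.foldl_cons, List.foldl_nil]
    have h6 := pvCountLoop (ps.map (fun p => ((PySem.Chars.splitOn p.toList ['\n']).length : Int))) 6 (0 + 1)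
    have h15 := pvCountLoop (ps.map (fun p => ((PySem.Chars.splitOn p.toList ['\n']).length : Int))) 15 (0 + 1)
    have h20 := pvCountLoop (ps.map (fun p => ((PySem.Chars.splitOn p.toList ['\n']).length : Int))) 20 (0 + 1)
    set n : Int := ((PySem.Chars.splitOn p.toList ['\n']).length : Int)
    split_ifs <;> omega

-- ===== VERDICT (by name: the statement is the Claim_ definition above) =====
theorem median_lenght_spec : Claim_equal_median_lenght := by
  intro paragraphs _
  unfold Spec_median_lenght
  exact pvSwap paragraphs
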